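-- pv_equiv track=rewrite | github.com/Fantoni0/keras | keras/layers/core.py | autocrop_array_shapes
-- ===== SOURCE A (Python) =====
-- def autocrop_array_shapes(input_shapes, cropping):
--     """Computes the shapes of the given arrays after auto-cropping is applied.
--
--     For more information on cropping, see the :func:`autocrop` function
--     documentation.
--
--     # Arguments
--         input_shapes: the shapes of input arrays prior to cropping in
--             the form of a list of tuples
--         cropping: a list of cropping modes, one for each axis. If length of
--             `cropping` is less than the number of axes in the inputs, it is
--             padded with `None`. If `cropping` is None, `input_shapes` is returned
--             as is. For more information on their values and operation, see the
--             :func:`autocrop` documentation.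
--
--     # Returns
--          shapes of the given arrays after auto-cropping is applied.
--     """
--     if cropping is None:
--         return input_shapes
--     else:
--         # Check for consistent number of dimensions
--         ndim = len(input_shapes[0])
--         if not all(len(sh) == ndim for sh in input_shapes):
--             raise ValueError("Not all inputs are of the same "
--                              "dimensionality. Got {0} inputs of "
--                              "dimensionalities {1}.".format(len(input_shapes), [len(sh) for sh in input_shapes]))
--
--         result = []
--
--         # If there are more dimensions than cropping entries, pad
--         # the cropping
--         cropping = list(cropping)
--         if ndim > len(cropping):
--             cropping = list(cropping) + [None] * (ndim - len(cropping))
--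
--         for sh, cr in zip(zip(*input_shapes), cropping):
--             if cr is None:
--                 result.append(sh)
--             elif cr in {'lower', 'center', 'upper'}:
--                 min_sh = None if any(inputs is None for inputs in sh) else min(sh)
--                 result.append([min_sh] * len(sh))
--             else:
--                 raise ValueError('Unknown crop mode \'{0}\''.format(cr))
--         return [tuple(sh) for sh in zip(*result)]
-- ===== SOURCE B (Python) =====
-- def autocrop_array_shapes(input_shapes, cropping):
--     if cropping is None:
--         return input_shapes
--     ndim = len(input_shapes[0])
--     if not all(len(sh) == ndim for sh in input_shapes):
--         raise ValueError("Not all inputs are of the same "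
--                          "dimensionality. Got {0} inputs of "
--                          "dimensionalities {1}.".format(len(input_shapes),
--                                                         [len(sh) for sh in input_shapes]))
--     # Effective per-axis modes: first ndim entries, padded with None.
--     modes = list(cropping)[:ndim] + [None] * (ndim - len(cropping))
--     # Per-axis summary table: KEEP sentinel, or the shared cropped target.
--     KEEP = object()
--     targets = []
--     for axis, cr in enumerate(modes):
--         if cr is None:
--             targets.append(KEEP)
--         elif cr in ('lower', 'center', 'upper'):
--             vals = [sh[axis] for sh in input_shapes]
--             targets.append(None if any(v is None for v in vals) else min(vals))
--         else:
--             raise ValueError('Unknown crop mode \'{0}\''.format(cr))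
--     # One direct pass per input shape; no transposes.
--     return [tuple(sh[axis] if t is KEEP else t for axis, t in enumerate(targets))
--             for sh in input_shapes]
-- ===== Notes on version B (the rewrite author's own statement) =====
-- stated objective: simpler
-- what changed: Replaces A's zip(*...)-transpose / per-axis-row loop / re-transpose pipeline with a per-axis target table built once, followed by one direct axis-by-axis pass over each input shape.
-- intended difference: On nonempty input_shapes whose shapes are 0-dimensional (ndim = 0) with cropping not None, A's empty transpose makes it return [] (dropping all inputs), while B returns one empty tuple per input, which is the intended 'shape of each array after cropping'. — e.g. on autocrop_array_shapes([[]], some []): A returns [], B returns [[]]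
import Mathlib
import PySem

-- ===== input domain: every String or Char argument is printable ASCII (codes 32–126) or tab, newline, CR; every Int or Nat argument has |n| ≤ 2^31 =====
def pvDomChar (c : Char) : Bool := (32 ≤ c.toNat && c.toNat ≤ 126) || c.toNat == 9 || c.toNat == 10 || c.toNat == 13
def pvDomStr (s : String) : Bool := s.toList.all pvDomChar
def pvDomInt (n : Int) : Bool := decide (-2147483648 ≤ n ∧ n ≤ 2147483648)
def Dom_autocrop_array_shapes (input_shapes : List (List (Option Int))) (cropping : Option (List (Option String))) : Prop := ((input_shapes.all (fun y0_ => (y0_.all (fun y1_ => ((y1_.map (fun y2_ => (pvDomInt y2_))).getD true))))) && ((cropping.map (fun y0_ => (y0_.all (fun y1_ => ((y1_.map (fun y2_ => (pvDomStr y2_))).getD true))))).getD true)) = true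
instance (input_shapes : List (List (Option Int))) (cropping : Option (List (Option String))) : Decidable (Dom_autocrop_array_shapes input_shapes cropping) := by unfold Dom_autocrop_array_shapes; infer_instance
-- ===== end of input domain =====

-- ===== PORT A =====
-- B restructures A's transpose/row-loop/transpose into a per-axis target table plus one
-- direct pass per input shape (objective: simpler); on ndim = 0 inputs B fixes A's
-- collapsed-to-[] result (see D_ below).

-- `None if any(x is None for x in sh) else min(sh)` (shared verbatim by both Pythons)
def pyMinNone (sh : List (Option Int)) : Option Int :=
  if sh.any (· == none) then none
  else
    match sh.filterMap id with
    | [] => none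
    | x :: xs => some (xs.foldl min x)

-- Python's zip(*xss): truncate every row to the shortest length and transpose
def pyZipStar (xss : List (List (Option Int))) : List (List (Option Int)) :=
  match xss with
  | [] => []
  | _ =>
    let m := xss.foldl (fun a xs => min a xs.length) (xss.headD []).length
    (List.range m).map (fun i => xss.map (fun xs => xs.getD i none))

-- A's for-loop over zip(zip(*input_shapes), cropping); none = the 'unknown crop mode' raise
def pvLoopA : List (List (Option Int) × Option String) → Option (List (List (Option Int)))
  | [] => some []
  | (sh, cr) :: rest =>
    match cr with
    | none => (pvLoopA rest).map (fun r => sh :: r)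
    | some s =>
      if s == "lower" || s == "center" || s == "upper" then
        (pvLoopA rest).map (fun r => List.replicate sh.length (pyMinNone sh) :: r)
      else none

def autocrop_array_shapes (input_shapes : List (List (Option Int))) (cropping : Option (List (Option String))) : List (List (Option Int)) :=
  match cropping with
  | none => input_shapes
  | some cropping0 =>
    let ndim := (input_shapes.headD []).length   -- input_shapes[0]: IndexError on [] (outside Pre_)
    if ¬ (input_shapes.all (fun sh => sh.length == ndim)) then []  -- ValueError (outside Pre_)
    else
      let cropping1 := if ndim > cropping0.length
        then cropping0 ++ List.replicate (ndim - cropping0.length) none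
        else cropping0
      match pvLoopA ((pyZipStar input_shapes).zip cropping1) with
      | none => []                                -- ValueError (outside Pre_)
      | some result => pyZipStar result

-- ===== PORT B =====
-- B's per-axis target table: `none` = KEEP sentinel, `some t` = shared crop target;
-- overall none = the 'unknown crop mode' raise
-- enumerate(xs): indices are the non-negative positions 0..len-1 (exact here)
def pvEnum {α : Type} (xs : List α) : List (Nat × α) := (List.range xs.length).zip xs

def pvTargets (input_shapes : List (List (Option Int))) : List (Nat × Option String) → Option (List (Option (Option Int)))
  | [] => some []
  | (axis, cr) :: rest =>
    match cr with
    | none => (pvTargets input_shapes rest).map (fun ts => none :: ts)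
    | some s =>
      if s == "lower" || s == "center" || s == "upper" then
        let vals := input_shapes.map (fun sh => sh.getD axis none)
        (pvTargets input_shapes rest).map (fun ts => some (pyMinNone vals) :: ts)
      else none

def autocrop_array_shapes_alt (input_shapes : List (List (Option Int))) (cropping : Option (List (Option String))) : List (List (Option Int)) :=
  match cropping with
  | none => input_shapes
  | some cropping0 =>
    let ndim := (input_shapes.headD []).length   -- input_shapes[0]: IndexError on [] (outside Pre_)
    if ¬ (input_shapes.all (fun sh => sh.length == ndim)) then []  -- ValueError (outside Pre_)
    else
      let modes := cropping0.take ndim ++ List.replicate (ndim - cropping0.length) none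
      match pvTargets input_shapes (pvEnum modes) with
      | none => []                                -- ValueError (outside Pre_)
      | some ts =>
        input_shapes.map (fun sh =>
          (pvEnum ts).map (fun q =>
            match q.2 with
            | none => sh.getD q.1 none
            | some t => t))

-- ===== PRECONDITION & SPEC =====
-- Pre_ excludes exactly the inputs where A raises: empty input_shapes with cropping given
-- (IndexError), inconsistent dimensionalities (ValueError), and an unknown crop mode among
-- the first ndim cropping entries (ValueError).
def Pre_autocrop_array_shapes (input_shapes : List (List (Option Int))) (cropping : Option (List (Option String))) : Prop :=
  cropping = none ∨
  (input_shapes ≠ [] ∧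
   (∀ sh ∈ input_shapes, sh.length = (input_shapes.headD []).length) ∧
   (∀ c ∈ (cropping.getD []).take (input_shapes.headD []).length,
      c = none ∨ c = some "lower" ∨ c = some "center" ∨ c = some "upper"))

instance (input_shapes : List (List (Option Int))) (cropping : Option (List (Option String))) : Decidable (Pre_autocrop_array_shapes input_shapes cropping) := by unfold Pre_autocrop_array_shapes; infer_instance

def pvWitness_autocrop_array_shapes : List (List (Option Int)) × Option (List (Option String)) :=
  ([[some 3, none], [some 2, some 5]], some [some "lower"])

-- On nonempty input_shapes whose shapes are 0-dimensional (ndim = 0) with cropping not None,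
-- A's empty transpose makes it return [] (dropping all inputs), while B returns one empty
-- tuple per input, which is the intended 'shape of each array after cropping'.
def D_autocrop_array_shapes (input_shapes : List (List (Option Int))) (cropping : Option (List (Option String))) : Prop :=
  cropping ≠ none ∧ input_shapes ≠ [] ∧ (input_shapes.headD []).length = 0

instance (input_shapes : List (List (Option Int))) (cropping : Option (List (Option String))) : Decidable (D_autocrop_array_shapes input_shapes cropping) := by unfold D_autocrop_array_shapes; infer_instance

def Spec_autocrop_array_shapes (input_shapes : List (List (Option Int))) (cropping : Option (List (Option String))) (out : List (List (Option Int))) : Prop := ¬ D_autocrop_array_shapes input_shapes cropping → out = autocrop_array_shapes_alt input_shapes cropping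
instance (input_shapes : List (List (Option Int))) (cropping : Option (List (Option String))) (out : List (List (Option Int))) : Decidable (Spec_autocrop_array_shapes input_shapes cropping out) := by unfold Spec_autocrop_array_shapes; infer_instance

def pvDiffWitness_autocrop_array_shapes : List (List (Option Int)) × Option (List (Option String)) :=
  ([[]], some [])

def pvDiffWitnessOut_autocrop_array_shapes : (List (List (Option Int))) × (List (List (Option Int))) :=
  ([], [[]])

-- ===== CLAIM (what is proved, stated in full; the proofs are below) =====
def Claim_unchanged_autocrop_array_shapes : Prop := ∀ (input_shapes : List (List (Option Int))) (cropping : Option (List (Option String))), Dom_autocrop_array_shapes input_shapes cropping → Pre_autocrop_array_shapes input_shapes cropping → Spec_autocrop_array_shapes input_shapes cropping (autocrop_array_shapes input_shapes cropping)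
def Claim_changed_autocrop_array_shapes : Prop := Dom_autocrop_array_shapes (pvDiffWitness_autocrop_array_shapes.1) (pvDiffWitness_autocrop_array_shapes.2) ∧ Pre_autocrop_array_shapes (pvDiffWitness_autocrop_array_shapes.1) (pvDiffWitness_autocrop_array_shapes.2) ∧ D_autocrop_array_shapes (pvDiffWitness_autocrop_array_shapes.1) (pvDiffWitness_autocrop_array_shapes.2) ∧ autocrop_array_shapes (pvDiffWitness_autocrop_array_shapes.1) (pvDiffWitness_autocrop_array_shapes.2) = pvDiffWitnessOut_autocrop_array_shapes.1 ∧ autocrop_array_shapes_alt (pvDiffWitness_autocrop_array_shapes.1) (pvDiffWitness_autocrop_array_shapes.2) = pvDiffWitnessOut_autocrop_array_shapes.2 ∧ pvDiffWitnessOut_autocrop_array_shapes.1 ≠ pvDiffWitnessOut_autocrop_array_shapes.2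
def Claim_exact_autocrop_array_shapes : Prop := ∀ (input_shapes : List (List (Option Int))) (cropping : Option (List (Option String))), Dom_autocrop_array_shapes input_shapes cropping → Pre_autocrop_array_shapes input_shapes cropping → D_autocrop_array_shapes input_shapes cropping → autocrop_array_shapes input_shapes cropping ≠ autocrop_array_shapes_alt input_shapes cropping

-- ===== LEMMAS AND PROOFS =====

lemma pvFoldlMinConst (xss : List (List (Option Int))) (m : Nat)
    (h : ∀ xs ∈ xss, xs.length = m) :
    xss.foldl (fun a xs => min a xs.length) m = m := by
  induction xss with
  | nil => rfl
  | cons x rest ih =>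
    simp only [List.foldl_cons, h x (by simp), min_self]
    exact ih (fun y hy => h y (by simp [hy]))

lemma pvZipStarEq (xss : List (List (Option Int))) (m : Nat) (hne : xss ≠ [])
    (h : ∀ xs ∈ xss, xs.length = m) :
    pyZipStar xss = (List.range m).map (fun i => xss.map (fun xs => xs.getD i none)) := by
  cases xss with
  | nil => exact absurd rfl hne
  | cons x rest =>
    have hfold : (x :: rest).foldl (fun a xs => min a xs.length) (((x :: rest).headD []).length) = m := by
      simp only [List.headD_cons, h x (by simp)]
      exact pvFoldlMinConst _ m h
    simp only [pyZipStar, hfold]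

lemma pvZipRangeMap {A B : Type} (m : Nat) (f : Nat → A) (ys : List B) (d : B)
    (hy : m ≤ ys.length) :
    ((List.range m).map f).zip ys = (List.range m).map (fun i => (f i, ys.getD i d)) := by
  apply List.ext_getElem
  · simp; omega
  · intro i h1 h2
    have hi : i < m := by simpa using h2
    simp only [List.getElem_zip, List.getElem_map, List.getElem_range]
    rw [List.getD_eq_getElem ys d (by omega)]

lemma pvLoopAValid (ps : List (List (Option Int) × Option String))
    (h : ∀ p ∈ ps, p.2 = none ∨ p.2 = some "lower" ∨ p.2 = some "center" ∨ p.2 = some "upper") :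
    pvLoopA ps = some (ps.map (fun p =>
      match p.2 with
      | none => p.1
      | some _ => List.replicate p.1.length (pyMinNone p.1))) := by
  induction ps with
  | nil => rfl
  | cons p rest ih =>
    have ihr := ih (fun q hq => h q (by simp [hq]))
    obtain ⟨sh, cr⟩ := p
    rcases h (sh, cr) (by simp) with h0 | h0 | h0 | h0 <;>
      simp only at h0 <;> subst h0 <;> simp [pvLoopA, ihr]

lemma pvTargetsValid (ishapes : List (List (Option Int))) (ps : List (Nat × Option String))
    (h : ∀ p ∈ ps, p.2 = none ∨ p.2 = some "lower" ∨ p.2 = some "center" ∨ p.2 = some "upper") :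
    pvTargets ishapes ps = some (ps.map (fun p =>
      match p.2 with
      | none => none
      | some _ => some (pyMinNone (ishapes.map (fun sh => sh.getD p.1 none))))) := by
  induction ps with
  | nil => rfl
  | cons p rest ih =>
    have ihr := ih (fun q hq => h q (by simp [hq]))
    obtain ⟨ax, cr⟩ := p
    rcases h (ax, cr) (by simp) with h0 | h0 | h0 | h0 <;>
      simp only at h0 <;> subst h0 <;> simp [pvTargets, ihr]

-- canonical per-input form shared by both reductions
def pvInner (ishapes : List (List (Option Int))) (cr : List (Option String)) (m : Nat)
    (sh : List (Option Int)) : List (Option Int) :=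
  (List.range m).map (fun i =>
    match (cr.take m ++ List.replicate (m - cr.length) none).getD i none with
    | none => sh.getD i none
    | some _ => pyMinNone (ishapes.map (fun xs => xs.getD i none)))

lemma pvEcropLen (cr : List (Option String)) (m : Nat) :
    (cr.take m ++ List.replicate (m - cr.length) none).length = m := by
  simp; omega

lemma pvEcropValid (cr : List (Option String)) (m : Nat)
    (hval : ∀ c ∈ cr.take m, c = none ∨ c = some "lower" ∨ c = some "center" ∨ c = some "upper") :
    ∀ c ∈ (cr.take m ++ List.replicate (m - cr.length) none),
      c = none ∨ c = some "lower" ∨ c = some "center" ∨ c = some "upper" := by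
  intro c hc
  rcases List.mem_append.mp hc with h1 | h1
  · exact hval c h1
  · exact Or.inl (List.eq_of_mem_replicate h1)

lemma pvMapRangeGetD {A B : Type} (xs : List A) (d : A) (f : A → B) :
    (List.range xs.length).map (fun j => f (xs.getD j d)) = xs.map f := by
  apply List.ext_getElem
  · simp
  · intro j h1 h2
    simp only [List.getElem_map, List.getElem_range]
    rw [List.getD_eq_getElem xs d (by simpa using h1)]

lemma pvPortA_eq (ishapes : List (List (Option Int))) (cr : List (Option String)) (m : Nat)
    (hne : ishapes ≠ []) (hm : (ishapes.headD []).length = m)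
    (hlen : ∀ sh ∈ ishapes, sh.length = m) (hm0 : m ≠ 0)
    (hval : ∀ c ∈ cr.take m, c = none ∨ c = some "lower" ∨ c = some "center" ∨ c = some "upper") :
    autocrop_array_shapes ishapes (some cr) =
      (List.range ishapes.length).map (fun j => pvInner ishapes cr m (ishapes.getD j [])) := by
  have hX : ishapes.all (fun sh => sh.length == m) = true := by
    simp only [List.all_eq_true, beq_iff_eq]; exact hlen
  have hvE := pvEcropValid cr m hval
  have heclen := pvEcropLen cr m
  simp only [autocrop_array_shapes, hm, hX, not_true_eq_false, if_false]
  rw [pvZipStarEq ishapes m hne hlen]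
  have hlecrop : m ≤ (if m > cr.length then cr ++ List.replicate (m - cr.length) none else cr).length := by
    split
    · simp; omega
    · omega
  rw [pvZipRangeMap m _ _ none hlecrop]
  have hgd : ∀ i ∈ List.range m,
      ((fun i => (ishapes.map (fun xs => xs.getD i none),
        (if m > cr.length then cr ++ List.replicate (m - cr.length) none else cr).getD i none)) i) =
      ((fun i => (ishapes.map (fun xs => xs.getD i none),
        (cr.take m ++ List.replicate (m - cr.length) none).getD i none)) i) := by
    intro i hi
    have him : i < m := List.mem_range.mp hi
    simp only [Prod.mk.injEq, true_and]
    split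
    · rename_i hcond
      rw [List.take_of_length_le (by omega)]
    · rename_i hcond
      have h0 : m - cr.length = 0 := by omega
      rw [h0, List.replicate_zero, List.append_nil]
      rw [List.getD_eq_getElem _ _ (by omega), List.getD_eq_getElem _ _ (by simp; omega),
        List.getElem_take]
  rw [List.map_congr_left hgd]
  rw [pvLoopAValid _ (by
    intro p hp
    rcases List.mem_map.mp hp with ⟨i, hi, rfl⟩
    have him : i < m := List.mem_range.mp hi
    rw [List.getD_eq_getElem _ _ (by omega)]
    exact hvE _ (List.getElem_mem _))]
  simp only [List.map_map]
  rw [pvZipStarEq _ ishapes.length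
    (by simp [hm0])
    (by
      intro r hr
      rcases List.mem_map.mp hr with ⟨i, _, rfl⟩
      simp only [Function.comp]
      split <;> simp)]
  apply List.ext_getElem
  · simp
  · intro j h1 h2
    have hj : j < ishapes.length := by simpa using h1
    simp only [List.getElem_map, List.getElem_range]
    apply List.ext_getElem
    · simp [pvInner]
    · intro i h3 h4
      have hi : i < m := by simpa using h3
      have hiec : i < (cr.take m ++ List.replicate (m - cr.length) none).length := by
        rw [pvEcropLen]; exact hi
      simp only [List.getElem_map, List.getElem_range, Function.comp, pvInner]
      rw [List.getD_eq_getElem (cr.take m ++ List.replicate (m - cr.length) none) none hiec]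
      cases hcase : (cr.take m ++ List.replicate (m - cr.length) none)[i] with
      | none =>
        simp only []
        rw [List.getD_eq_getElem (ishapes.map (fun xs => xs.getD i none)) none (by simpa using hj),
          List.getElem_map, List.getD_eq_getElem ishapes [] hj]
      | some s =>
        simp only []
        rw [List.getD_eq_getElem (List.replicate (ishapes.map (fun xs => xs.getD i none)).length
              (pyMinNone (ishapes.map (fun xs => xs.getD i none)))) none (by simpa using hj),
          List.getElem_replicate]

lemma pvPortB_eq (ishapes : List (List (Option Int))) (cr : List (Option String)) (m : Nat)
    (hm : (ishapes.headD []).length = m)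
    (hlen : ∀ sh ∈ ishapes, sh.length = m)
    (hval : ∀ c ∈ cr.take m, c = none ∨ c = some "lower" ∨ c = some "center" ∨ c = some "upper") :
    autocrop_array_shapes_alt ishapes (some cr) = ishapes.map (pvInner ishapes cr m) := by
  have hX : ishapes.all (fun sh => sh.length == m) = true := by
    simp only [List.all_eq_true, beq_iff_eq]; exact hlen
  have hvE := pvEcropValid cr m hval
  have heclen := pvEcropLen cr m
  simp only [autocrop_array_shapes_alt, hm, hX, not_true_eq_false, if_false]
  rw [pvTargetsValid ishapes _ (by
    intro p hp
    exact hvE _ (List.of_mem_zip hp).2)]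
  simp only []
  apply List.map_congr_left
  intro sh _
  apply List.ext_getElem
  · simp [pvEnum, pvInner, heclen]
  · intro i h1 h2
    have hi : i < m := by simpa [pvInner] using h2
    have hiec : i < (cr.take m ++ List.replicate (m - cr.length) none).length := by
      rw [pvEcropLen]; exact hi
    simp only [pvEnum, List.getElem_map, List.getElem_zip, List.getElem_range, pvInner]
    rw [List.getD_eq_getElem (cr.take m ++ List.replicate (m - cr.length) none) none hiec]
    cases hcase : (cr.take m ++ List.replicate (m - cr.length) none)[i] with
    | none => simp
    | some s => simp

-- ===== VERDICT (by name: the statement is the Claim_ definition above) =====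
theorem autocrop_array_shapes_spec : Claim_unchanged_autocrop_array_shapes := by
  intro input_shapes cropping _ hpre hnD
  cases cropping with
  | none => rfl
  | some cr =>
    rcases hpre with h | ⟨hne, hlen, hval⟩
    · simp at h
    have hm0 : (input_shapes.headD []).length ≠ 0 := by
      intro h0; exact hnD ⟨by simp, hne, h0⟩
    rw [pvPortA_eq input_shapes cr ((input_shapes.headD []).length) hne rfl hlen hm0
        (by simpa using hval),
      pvPortB_eq input_shapes cr ((input_shapes.headD []).length) rfl hlen
        (by simpa using hval)]
    exact pvMapRangeGetD input_shapes [] (pvInner input_shapes cr _)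
theorem autocrop_array_shapes_changed : Claim_changed_autocrop_array_shapes := by
  unfold Claim_changed_autocrop_array_shapes; decide
theorem autocrop_array_shapes_tight : Claim_exact_autocrop_array_shapes := by
  intro input_shapes cropping _ hpre hD
  obtain ⟨hc, hne, hnd⟩ := hD
  cases cropping with
  | none => exact absurd rfl hc
  | some cr =>
    obtain ⟨x, rest, rfl⟩ := List.exists_cons_of_ne_nil hne
    rcases hpre with h | ⟨_, hlen, _⟩
    · simp at h
    simp only [List.headD_cons] at hnd hlen
    have hx : x = [] := List.eq_nil_of_length_eq_zero hnd
    subst hx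
    have hall : ((([] : List (Option Int)) :: rest).all
        (fun sh => sh.length == ((([] : List (Option Int)) :: rest).headD []).length)) = true := by
      simp only [List.all_eq_true, beq_iff_eq, List.headD_cons]; exact hlen
    have hA : autocrop_array_shapes (([] : List (Option Int)) :: rest) (some cr) = [] := by
      simp only [autocrop_array_shapes, hall]
      rw [pvZipStarEq (([] : List (Option Int)) :: rest) 0 (by simp)
        (by intro xs hxs; simpa using hlen xs hxs)]
      simp [pvLoopA, pyZipStar]
    rw [hA]
    simp [autocrop_array_shapes_alt, pvEnum, pvTargets]
    intro y hy
    exact List.eq_nil_of_length_eq_zero (by simpa using hlen y (List.mem_cons_of_mem _ hy))
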